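-- pv_equiv track=rewrite | github.com/nayr780/client | queue_client_front.py | detect_job_status_from_logs
-- ===== SOURCE A (Python) =====
-- from typing import Dict, Any, List, Optional, Union, Tuple, Set
--
-- def detect_job_status_from_logs(lines: List[str]) -> str:
--     if not lines:
--         return "pending"
--     lower_lines = [(l or "").lower() for l in lines]
--     joined = "\n".join(lower_lines)
--     if any("=== fim" in l and "ok" in l for l in lower_lines): return "success"
--     if "'status': 'ok'" in joined or '"status": "ok"' in joined: return "success"
--     if "finalizado" in joined or "concluído" in joined or "concluido" in joined: return "success"
--     ERROR_TOKENS = [" erro ", "error", "exception", "traceback", "loginerror", "cnpjinexistenteerror", "cnpjmismatcherror"]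
--     if any(tok in joined for tok in ERROR_TOKENS): return "error"
--     return "running"
-- ===== SOURCE B (Python) =====
-- SUCCESS_TOKENS = ("'status': 'ok'", '"status": "ok"', "finalizado",
--                   "concluído", "concluido")
-- ERROR_TOKENS = (" erro ", "error", "exception", "traceback", "loginerror",
--                 "cnpjinexistenteerror", "cnpjmismatcherror")
--
-- def _rank(raw):
--     """Severity rank of one line: 0 = success evidence, 1 = error evidence, 2 = neither."""
--     l = raw.lower()
--     if "=== fim" in l and "ok" in l:
--         return 0
--     for t in SUCCESS_TOKENS:
--         if t in l:
--             return 0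
--     for t in ERROR_TOKENS:
--         if t in l:
--             return 1
--     return 2
--
-- def detect_job_status_from_logs(lines):
--     if not lines:
--         return "pending"
--     return ("success", "error", "running")[min(_rank(l) for l in lines)]
-- ===== Notes on version B (the rewrite author's own statement) =====
-- stated objective: alternative
-- what changed: A joins all lowercased lines into one big string and runs an ordered chain of whole-text membership checks with early returns; B instead classifies each line independently into a numeric severity rank (0=success, 1=error, 2=neither) and reduces the list with min(), indexing the answer table by the minimum rank, so the precedence logic lives in the numeric order rather than in a branch chain.
import Mathlib
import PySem

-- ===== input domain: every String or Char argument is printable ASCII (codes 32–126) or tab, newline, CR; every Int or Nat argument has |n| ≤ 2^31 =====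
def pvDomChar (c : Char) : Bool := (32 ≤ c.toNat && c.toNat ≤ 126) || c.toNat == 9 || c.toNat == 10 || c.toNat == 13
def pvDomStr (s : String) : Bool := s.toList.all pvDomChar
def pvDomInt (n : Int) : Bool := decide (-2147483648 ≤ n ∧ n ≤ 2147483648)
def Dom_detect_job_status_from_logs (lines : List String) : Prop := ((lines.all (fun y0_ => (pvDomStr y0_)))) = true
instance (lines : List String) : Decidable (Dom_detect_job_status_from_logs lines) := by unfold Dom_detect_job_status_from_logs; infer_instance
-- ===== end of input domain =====

-- B replaces A's ordered chain of membership checks over one joined string by a per-line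
-- numeric severity rank (0 success, 1 error, 2 neither) reduced with min and used to index
-- the answer table (objective: alternative decomposition).

-- ===== PORT A =====
def detect_job_status_from_logs (lines : List String) : String :=
  if lines = [] then "pending" else
  let lower_lines := lines.map (fun l => PySem.Str.lower (if l == "" then "" else l))
  let joined := PySem.Str.join "\n" lower_lines
  if lower_lines.any (fun l => PySem.Str.isIn "=== fim" l && PySem.Str.isIn "ok" l) then "success"
  else if PySem.Str.isIn "'status': 'ok'" joined || PySem.Str.isIn "\"status\": \"ok\"" joined then "success"
  else if PySem.Str.isIn "finalizado" joined || PySem.Str.isIn "concluído" joined || PySem.Str.isIn "concluido" joined then "success"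
  else if ([" erro ", "error", "exception", "traceback", "loginerror", "cnpjinexistenteerror", "cnpjmismatcherror"] : List String).any
            (fun tok => PySem.Str.isIn tok joined) then "error"
  else "running"

-- ===== PORT B =====
def pvSuccessTokens : List String := ["'status': 'ok'", "\"status\": \"ok\"", "finalizado", "concluído", "concluido"]
def pvErrorTokens : List String := [" erro ", "error", "exception", "traceback", "loginerror", "cnpjinexistenteerror", "cnpjmismatcherror"]

-- _rank: early-return chain of Source B, transliterated
def pvRank (raw : String) : Nat :=
  let l := PySem.Str.lower raw
  if PySem.Str.isIn "=== fim" l && PySem.Str.isIn "ok" l then 0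
  else if pvSuccessTokens.any (fun t => PySem.Str.isIn t l) then 0
  else if pvErrorTokens.any (fun t => PySem.Str.isIn t l) then 1
  else 2

def detect_job_status_from_logs_alt (lines : List String) : String :=
  if lines = [] then "pending" else
  -- min(_rank(l) for l in lines), then ("success","error","running")[that]
  match PySem.List.min? (lines.map pvRank) (fun r => r) with
  | some 0 => "success"
  | some 1 => "error"
  | _ => "running"

-- ===== PRECONDITION & SPEC =====
def Spec_detect_job_status_from_logs (lines : List String) (out : String) : Prop := out = detect_job_status_from_logs_alt lines
instance (lines : List String) (out : String) : Decidable (Spec_detect_job_status_from_logs lines out) := by unfold Spec_detect_job_status_from_logs; infer_instance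

-- ===== CLAIM (what is proved, stated in full; the proofs are below) =====
def Claim_equal_detect_job_status_from_logs : Prop := ∀ (lines : List String), Dom_detect_job_status_from_logs lines → Spec_detect_job_status_from_logs lines (detect_job_status_from_logs lines)


-- ===== LEMMAS AND PROOFS =====
theorem pv_prefix_split {t xs ys : List Char} {c : Char} (hc : c ∉ t)
    (hp : t <+: xs ++ c :: ys) : t <+: xs := by
  by_cases hlen : t.length ≤ xs.length
  · have ht := List.prefix_iff_eq_take.mp hp
    rw [List.take_append_of_le_length hlen] at ht
    exact ht ▸ List.take_prefix _ _
  · exfalso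
    have hx : xs.length < t.length := by omega
    have h1 : t[xs.length] = (xs ++ c :: ys)[xs.length]'(by simp) := hp.getElem hx
    have h2 : t[xs.length] = c := by rw [h1]; simp
    exact hc (h2 ▸ List.getElem_mem hx)

theorem pv_isIn_split (t xs ys : List Char) (c : Char) (hc : c ∉ t) :
    PySem.Chars.isIn t (xs ++ c :: ys) = true ↔
      PySem.Chars.isIn t xs = true ∨ PySem.Chars.isIn t ys = true := by
  constructor
  · intro h
    obtain ⟨j, hp⟩ := (PySem.Chars.exists_prefix_drop_iff_isIn t (xs ++ c :: ys)).mpr h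
    rw [List.drop_append] at hp
    by_cases hj : j ≤ xs.length
    · left
      exact (PySem.Chars.exists_prefix_drop_iff_isIn t xs).mp
        ⟨j, pv_prefix_split hc (by simpa [List.drop_eq_nil_of_le, hj,
          List.drop_of_length_le] using hp)⟩
    · right
      have hd : xs.drop j = [] := List.drop_eq_nil_of_le (by omega)
      rw [hd, List.nil_append] at hp
      rcases Nat.exists_eq_add_of_lt (by omega : xs.length < j) with ⟨k, hk⟩
      have : (c :: ys).drop (j - xs.length) = ys.drop k := by
        subst hk
        have hke : xs.length + k + 1 - xs.length = k + 1 := by omega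
        rw [hke]
        rfl
      rw [this] at hp
      exact (PySem.Chars.exists_prefix_drop_iff_isIn t ys).mp ⟨k, hp⟩
  · rintro (h | h)
    · rw [PySem.Chars.isIn_iff_infix] at h ⊢
      exact List.infix_append_of_infix_left h
    · rw [PySem.Chars.isIn_iff_infix] at h ⊢
      exact List.infix_append_of_infix_right (h.trans (List.suffix_cons c ys).isInfix)

theorem pv_isIn_join (t : List Char) (c : Char) (hc : c ∉ t) :
    ∀ (ls : List (List Char)), ls ≠ [] →
      (PySem.Chars.isIn t (PySem.Chars.join [c] ls) = true ↔
        ∃ l ∈ ls, PySem.Chars.isIn t l = true) := by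
  intro ls
  induction ls with
  | nil => simp
  | cons x rest ih =>
    intro _
    cases rest with
    | nil => simp [PySem.Chars.join_singleton]
    | cons y r =>
      rw [PySem.Chars.join_cons_cons]
      rw [List.append_assoc, List.singleton_append, pv_isIn_split t x _ c hc]
      rw [ih (by simp)]
      simp

theorem pv_str_isIn_join (t : String) (ls : List String) (hne : ls ≠ [])
    (hc : '\n' ∉ t.toList) :
    PySem.Str.isIn t (PySem.Str.join "\n" ls) = ls.any (fun l => PySem.Str.isIn t l) := by
  have hmap : ls.map String.toList ≠ [] := by simpa using hne
  have h := pv_isIn_join t.toList '\n' hc (ls.map String.toList) hmap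
  rw [Bool.eq_iff_iff]
  simp only [PySem.Str.isIn_eq, PySem.Str.toList_join, List.any_eq_true]
  have hnl : ("\n" : String).toList = ['\n'] := rfl
  rw [hnl, h]
  constructor
  · rintro ⟨l, hl, hin⟩
    rcases List.mem_map.mp hl with ⟨s, hs, rfl⟩
    exact ⟨s, hs, hin⟩
  · rintro ⟨s, hs, hin⟩
    exact ⟨s.toList, List.mem_map.mpr ⟨s, hs, rfl⟩, hin⟩

-- per-line success / error conditions as A sees them
def pvSuccFn (raw : String) : Bool :=
  (PySem.Str.isIn "=== fim" (PySem.Str.lower raw) && PySem.Str.isIn "ok" (PySem.Str.lower raw))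
    || pvSuccessTokens.any (fun t => PySem.Str.isIn t (PySem.Str.lower raw))

def pvErrFn (raw : String) : Bool :=
  pvErrorTokens.any (fun t => PySem.Str.isIn t (PySem.Str.lower raw))

theorem pvRank_le_two (raw : String) : pvRank raw ≤ 2 := by
  simp only [pvRank]; split_ifs <;> omega

theorem pvRank_zero_iff (raw : String) : (pvRank raw == 0) = pvSuccFn raw := by
  simp only [pvRank, pvSuccFn]
  split_ifs with h1 h2 h3 <;> simp_all

theorem pvRank_one_iff (raw : String) (h : pvSuccFn raw = false) :
    (pvRank raw == 1) = pvErrFn raw := by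
  simp only [pvRank, pvErrFn]
  unfold pvSuccFn at h
  rw [Bool.or_eq_false_iff] at h
  obtain ⟨ha, hb⟩ := h
  split_ifs with h1 h2 h3
  · exact absurd h1 (by rw [ha]; exact Bool.false_ne_true)
  · exact absurd h2 (by rw [hb]; exact Bool.false_ne_true)
  · rw [h3]; rfl
  · rw [Bool.not_eq_true] at h3; rw [h3]; rfl

-- the status rank of a whole list
def pvStatusR (lines : List String) : Nat :=
  if lines.any (fun r => pvRank r == 0) then 0
  else if lines.any (fun r => pvRank r == 1) then 1 else 2

theorem pv_min_rank_cons (x : String) (xs : List String) :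
    min (pvRank x) (pvStatusR xs) = pvStatusR (x :: xs) := by
  have hx := pvRank_le_two x
  have hS : pvStatusR xs ≤ 2 := by unfold pvStatusR; split_ifs <;> omega
  by_cases h0 : pvRank x = 0
  · simp [pvStatusR, List.any_cons, h0]
  · by_cases h1 : pvRank x = 1
    · simp only [pvStatusR, List.any_cons, h1]
      norm_num
      split_ifs <;> omega
    · have h2 : pvRank x = 2 := by omega
      simp only [pvStatusR, List.any_cons, h2]
      norm_num
      split_ifs <;> omega

theorem pv_fold_min (lines : List String) (m : Nat) (hm : m ≤ 2) :
    (lines.map pvRank).foldl min m = min m (pvStatusR lines) := by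
  induction lines generalizing m with
  | nil => simp [pvStatusR]; omega
  | cons x xs ih =>
    rw [List.map_cons, List.foldl_cons, ih (min m (pvRank x)) (by have := pvRank_le_two x; omega)]
    rw [Nat.min_assoc, pv_min_rank_cons]

theorem pv_any_or {α : Type} (l : List α) (p q : α → Bool) :
    l.any (fun x => p x || q x) = (l.any p || l.any q) := by
  induction l with
  | nil => simp
  | cons x xs ih => simp only [List.any_cons, ih]; ac_rfl

-- collapse A's three success branches into one boolean
theorem pv_chain_collapse (x y z e : Bool) (S E R : String) :
    (if x then S else if y then S else if z then S else if e then E else R) =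
    (if x || y || z then S else if e then E else R) := by
  cases x <;> cases y <;> cases z <;> simp

-- ===== VERDICT (by name: the statement is the Claim_ definition above) =====
theorem detect_job_status_from_logs_spec : Claim_equal_detect_job_status_from_logs := by
  intro lines _
  unfold Spec_detect_job_status_from_logs detect_job_status_from_logs detect_job_status_from_logs_alt
  by_cases hnil : lines = []
  · simp [hnil]
  · simp only [if_neg hnil]
    have horempty : lines.map (fun l => PySem.Str.lower (if l == "" then "" else l)) =
        lines.map (fun l => PySem.Str.lower l) := by
      apply List.map_congr_left
      intro l _
      by_cases h : l = "" <;> simp [h]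
    rw [horempty]
    have hLne : lines.map (fun l => PySem.Str.lower l) ≠ [] := by simpa using hnil
    have hj0 := pv_str_isIn_join "'status': 'ok'" _ hLne (by decide)
    have hj1 := pv_str_isIn_join "\"status\": \"ok\"" _ hLne (by decide)
    have hj2 := pv_str_isIn_join "finalizado" _ hLne (by decide)
    have hj3 := pv_str_isIn_join "concluído" _ hLne (by decide)
    have hj4 := pv_str_isIn_join "concluido" _ hLne (by decide)
    have hj5 := pv_str_isIn_join " erro " _ hLne (by decide)
    have hj6 := pv_str_isIn_join "error" _ hLne (by decide)
    have hj7 := pv_str_isIn_join "exception" _ hLne (by decide)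
    have hj8 := pv_str_isIn_join "traceback" _ hLne (by decide)
    have hj9 := pv_str_isIn_join "loginerror" _ hLne (by decide)
    have hj10 := pv_str_isIn_join "cnpjinexistenteerror" _ hLne (by decide)
    have hj11 := pv_str_isIn_join "cnpjmismatcherror" _ hLne (by decide)
    simp only [List.any_cons, List.any_nil, hj0, hj1, hj2, hj3, hj4, hj5, hj6, hj7, hj8, hj9, hj10, hj11]
    rw [pv_chain_collapse]
    have hsucc : ((lines.map (fun l => PySem.Str.lower l)).any
          (fun l => PySem.Str.isIn "=== fim" l && PySem.Str.isIn "ok" l) ||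
        ((lines.map (fun l => PySem.Str.lower l)).any (fun l => PySem.Str.isIn "'status': 'ok'" l) ||
         (lines.map (fun l => PySem.Str.lower l)).any (fun l => PySem.Str.isIn "\"status\": \"ok\"" l)) ||
        ((lines.map (fun l => PySem.Str.lower l)).any (fun l => PySem.Str.isIn "finalizado" l) ||
         (lines.map (fun l => PySem.Str.lower l)).any (fun l => PySem.Str.isIn "concluído" l) ||
         (lines.map (fun l => PySem.Str.lower l)).any (fun l => PySem.Str.isIn "concluido" l))) =
        lines.any (fun raw => pvSuccFn raw) := by
      simp only [pvSuccFn, List.any_map, Function.comp_def, pvSuccessTokens,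
        List.any_cons, List.any_nil, Bool.or_false, pv_any_or]
      ac_rfl
    have herr : ((lines.map (fun l => PySem.Str.lower l)).any (fun l => PySem.Str.isIn " erro " l) ||
        ((lines.map (fun l => PySem.Str.lower l)).any (fun l => PySem.Str.isIn "error" l) ||
         ((lines.map (fun l => PySem.Str.lower l)).any (fun l => PySem.Str.isIn "exception" l) ||
          ((lines.map (fun l => PySem.Str.lower l)).any (fun l => PySem.Str.isIn "traceback" l) ||
           ((lines.map (fun l => PySem.Str.lower l)).any (fun l => PySem.Str.isIn "loginerror" l) ||
            ((lines.map (fun l => PySem.Str.lower l)).any (fun l => PySem.Str.isIn "cnpjinexistenteerror" l) ||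
             ((lines.map (fun l => PySem.Str.lower l)).any (fun l => PySem.Str.isIn "cnpjmismatcherror" l) ||
              false))))))) =
        lines.any (fun raw => pvErrFn raw) := by
      simp only [pvErrFn, List.any_map, Function.comp_def, pvErrorTokens,
        List.any_cons, List.any_nil, Bool.or_false, pv_any_or]
    rw [hsucc, herr]
    -- B side: evaluate the min of the ranks
    obtain ⟨x, xs, rfl⟩ := List.exists_cons_of_ne_nil hnil
    rw [List.map_cons, PySem.List.min?_id_cons,
        pv_fold_min xs (pvRank x) (pvRank_le_two x), pv_min_rank_cons]
    have hz : (x :: xs).any (fun r => pvRank r == 0) = (x :: xs).any (fun raw => pvSuccFn raw) := by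
      simp only [pvRank_zero_iff]
    by_cases hs : (x :: xs).any (fun raw => pvSuccFn raw)
    · have : pvStatusR (x :: xs) = 0 := by unfold pvStatusR; rw [hz, hs]; simp
      rw [this, hs]
      simp
    · have hsf : (x :: xs).any (fun raw => pvSuccFn raw) = false := by simpa using hs
      have hall : ∀ r ∈ x :: xs, pvSuccFn r = false := by
        intro r hr
        by_contra hcon
        exact hs (List.any_eq_true.mpr ⟨r, hr, by simpa using hcon⟩)
      have hone : (x :: xs).any (fun r => pvRank r == 1) = (x :: xs).any (fun raw => pvErrFn raw) := by
        rw [Bool.eq_iff_iff]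
        simp only [List.any_eq_true]
        constructor
        · rintro ⟨r, hr, h⟩; exact ⟨r, hr, by rw [← pvRank_one_iff r (hall r hr)]; exact h⟩
        · rintro ⟨r, hr, h⟩; exact ⟨r, hr, by rw [pvRank_one_iff r (hall r hr)]; exact h⟩
      have hsr : pvStatusR (x :: xs) = (if (x :: xs).any (fun raw => pvErrFn raw) then 1 else 2) := by
        unfold pvStatusR; rw [hz, hsf, hone]; simp
      rw [hsf, hsr]
      by_cases he : (x :: xs).any (fun raw => pvErrFn raw)
      · rw [he]; simp
      · have hef : (x :: xs).any (fun raw => pvErrFn raw) = false := by simpa using he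
        rw [hef]; simp
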